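-- pv_equiv track=rewrite | github.com/jliao1/PythonStudy | 九章算法班/wk2_宽度优先搜索/BFS.py | build605
-- ===== SOURCE A (Python) =====
-- def build605(org, seqs):
--     # build  易错点: 这道题里要用 seqs 里的元素来建立graph模型，而不是用org
--     graph = {}
--     for seg in seqs:
--         length = len(seg)
--         if length == 0:
--             continue
--         for i, num in enumerate(seg):
--             graph.setdefault(num, set())
--             if 1 <= i < length:
--                 graph[seg[i - 1]].add(num)
--
--     # in-degree
--     in_degree = {node: 0 for node in graph}
--     for node in graph:
--         for s in graph[node]:
--             in_degree[s] += 1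
--
--     return graph, in_degree
-- ===== SOURCE B (Python) =====
-- def build605(org, seqs):
--     # Single pass: maintain the adjacency sets and the in-degree counts together,
--     # guarding the increment by a membership test, instead of a second traversal.
--     graph = {}
--     in_degree = {}
--     for seg in seqs:
--         for i, num in enumerate(seg):
--             graph.setdefault(num, set())
--             in_degree.setdefault(num, 0)
--             if i >= 1:
--                 prev = seg[i - 1]
--                 if num not in graph[prev]:
--                     in_degree[num] += 1
--                     graph[prev].add(num)
--     return graph, in_degree
-- ===== Notes on version B (the rewrite author's own statement) =====
-- stated objective: alternative
-- what changed: B builds the adjacency sets and the in-degree map together in one pass over the sequences (incrementing the in-degree only when a membership test shows the edge is new), instead of A's second full traversal of the finished graph to tally in-degrees.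
import Mathlib
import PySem

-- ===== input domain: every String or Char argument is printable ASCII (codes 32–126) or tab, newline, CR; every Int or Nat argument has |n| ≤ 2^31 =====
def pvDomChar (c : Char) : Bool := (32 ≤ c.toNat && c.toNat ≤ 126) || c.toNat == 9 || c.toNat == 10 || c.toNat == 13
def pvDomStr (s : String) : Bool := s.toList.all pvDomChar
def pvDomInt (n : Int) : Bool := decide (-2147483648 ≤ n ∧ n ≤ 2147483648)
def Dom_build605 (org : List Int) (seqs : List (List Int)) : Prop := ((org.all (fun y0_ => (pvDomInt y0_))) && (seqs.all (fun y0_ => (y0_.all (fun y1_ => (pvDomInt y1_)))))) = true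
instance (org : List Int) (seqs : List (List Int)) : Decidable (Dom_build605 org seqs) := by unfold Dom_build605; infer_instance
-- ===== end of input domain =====

-- B maintains the adjacency sets and the in-degree counts together in one pass
-- (guarded increment on a new edge) instead of A's second traversal of the graph.


-- ===== PORT A =====
def build605 (org : List Int) (seqs : List (List Int)) : (List (Int × List Int)) × (List (Int × Int)) :=
  let graph : PySem.Dict Int (PySem.Set Int) :=
    seqs.foldl (fun graph seg =>
      let length : Int := seg.length
      if length = 0 then graph
      else
        (PySem.List.enumerate seg).foldl (fun graph p =>
          let i := p.1
          let num := p.2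
          let graph := graph.setdefault num PySem.Set.empty
          if 1 ≤ i ∧ i < length then
            -- graph[seg[i-1]].add(num): the key seg[i-1] is always present, the index i-1 in range
            graph.modify (PySem.List.pyGetD seg (i - 1) 0) PySem.Set.empty
              (fun s => PySem.Set.add s num)
          else graph) graph) PySem.Dict.empty
  let in_degree0 : PySem.Dict Int Int :=
    graph.keys.foldl (fun d node => d.insert node 0) PySem.Dict.empty
  let in_degree :=
    graph.keys.foldl (fun d node =>
      (graph.getD node PySem.Set.empty).foldl (fun d s => d.modify s 0 (· + 1)) d) in_degree0
  (graph.items, in_degree.items)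

-- ===== PORT B =====
def build605_alt (org : List Int) (seqs : List (List Int)) : (List (Int × List Int)) × (List (Int × Int)) :=
  let st : PySem.Dict Int (PySem.Set Int) × PySem.Dict Int Int :=
    seqs.foldl (fun st seg =>
      (PySem.List.enumerate seg).foldl (fun st p =>
        let i := p.1
        let num := p.2
        let graph := st.1.setdefault num PySem.Set.empty
        let in_degree := st.2.setdefault num (0 : Int)
        if 1 ≤ i then
          -- prev = seg[i-1]: the index i-1 is always in range
          let prev := PySem.List.pyGetD seg (i - 1) 0
          if PySem.Set.contains (graph.getD prev PySem.Set.empty) num then (graph, in_degree)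
          else (graph.modify prev PySem.Set.empty (fun s => PySem.Set.add s num),
                in_degree.modify num 0 (· + 1))
        else (graph, in_degree)) st)
      (PySem.Dict.empty, PySem.Dict.empty)
  (st.1.items, st.2.items)

-- ===== PRECONDITION & SPEC =====
def Spec_build605 (org : List Int) (seqs : List (List Int)) (out : (List (Int × List Int)) × (List (Int × Int))) : Prop := out = build605_alt org seqs
instance (org : List Int) (seqs : List (List Int)) (out : (List (Int × List Int)) × (List (Int × Int))) : Decidable (Spec_build605 org seqs out) := by unfold Spec_build605; infer_instance

-- ===== CLAIM (what is proved, stated in full; the proofs are below) =====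
def Claim_equal_build605 : Prop := ∀ (org : List Int) (seqs : List (List Int)), Dom_build605 org seqs → Spec_build605 org seqs (build605 org seqs)

-- ===== LEMMAS AND PROOFS =====

-- A's graph-building loop, factored: the body of the inner loop of A
def segA (seg : List Int) (graph : PySem.Dict Int (PySem.Set Int)) : PySem.Dict Int (PySem.Set Int) :=
  let length : Int := seg.length
  if length = 0 then graph
  else
    (PySem.List.enumerate seg).foldl (fun graph p =>
      let i := p.1
      let num := p.2
      let graph := graph.setdefault num PySem.Set.empty
      if 1 ≤ i ∧ i < length then
        graph.modify (PySem.List.pyGetD seg (i - 1) 0) PySem.Set.empty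
          (fun s => PySem.Set.add s num)
      else graph) graph

def segB (seg : List Int) (st : PySem.Dict Int (PySem.Set Int) × PySem.Dict Int Int) :
    PySem.Dict Int (PySem.Set Int) × PySem.Dict Int Int :=
  (PySem.List.enumerate seg).foldl (fun st p =>
    let i := p.1
    let num := p.2
    let graph := st.1.setdefault num PySem.Set.empty
    let in_degree := st.2.setdefault num (0 : Int)
    if 1 ≤ i then
      let prev := PySem.List.pyGetD seg (i - 1) 0
      if PySem.Set.contains (graph.getD prev PySem.Set.empty) num then (graph, in_degree)
      else (graph.modify prev PySem.Set.empty (fun s => PySem.Set.add s num),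
            in_degree.modify num 0 (· + 1))
    else (graph, in_degree)) st

-- edge-list view of the inner loops
def edgeA (g : PySem.Dict Int (PySem.Set Int)) (c n : Int) : PySem.Dict Int (PySem.Set Int) :=
  (g.setdefault n PySem.Set.empty).modify c PySem.Set.empty (fun s => PySem.Set.add s n)

def edgesA (g : PySem.Dict Int (PySem.Set Int)) (ps : List (Int × Int)) : PySem.Dict Int (PySem.Set Int) :=
  ps.foldl (fun g p => edgeA g p.1 p.2) g

def edgeB (st : PySem.Dict Int (PySem.Set Int) × PySem.Dict Int Int) (c n : Int) :
    PySem.Dict Int (PySem.Set Int) × PySem.Dict Int Int :=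
  let g := st.1.setdefault n PySem.Set.empty
  let d := st.2.setdefault n (0 : Int)
  if PySem.Set.contains (g.getD c PySem.Set.empty) n then (g, d)
  else (g.modify c PySem.Set.empty (fun s => PySem.Set.add s n), d.modify n 0 (· + 1))

def edgesB (st : PySem.Dict Int (PySem.Set Int) × PySem.Dict Int Int) (ps : List (Int × Int)) :
    PySem.Dict Int (PySem.Set Int) × PySem.Dict Int Int :=
  ps.foldl (fun st p => edgeB st p.1 p.2) st

-- total multiplicity of x over all adjacency sets
def cnt (g : PySem.Dict Int (PySem.Set Int)) (x : Int) : Int :=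
  (g.keys.map (fun j => ((g.getD j PySem.Set.empty).count x : Int))).sum

-- the invariant tying B's in-degree dict to the graph
def InvGD (g : PySem.Dict Int (PySem.Set Int)) (d : PySem.Dict Int Int) : Prop :=
  g.keys.Nodup ∧
  (∀ k ∈ g.keys, ∀ x ∈ g.getD k PySem.Set.empty, x ∈ g.keys) ∧
  d.keys = g.keys ∧
  (∀ x, d.getD x 0 = cnt g x)

def Chain : Int → List (Int × Int) → Prop
  | _, [] => True
  | c, p :: t => p.1 = c ∧ Chain p.2 t


theorem dict_eq_of_keys_getD {ν : Type} (d d' : PySem.Dict Int ν) (dflt : ν)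
    (h1 : d.keys.Nodup) (hk : d.keys = d'.keys)
    (h : ∀ k, d.getD k dflt = d'.getD k dflt) : d = d' := by
  apply PySem.Dict.ext
  rw [PySem.Dict.items_eq_map_keys d h1 dflt, PySem.Dict.items_eq_map_keys d' (hk ▸ h1) dflt, ← hk]
  exact List.map_congr_left (fun k _ => by rw [h k])

theorem modify_noop {ν : Type} (d : PySem.Dict Int ν) (c : Int) (dflt : ν) (f : ν → ν)
    (hc : c ∈ d.keys) (hnd : d.keys.Nodup) (hf : f (d.getD c dflt) = d.getD c dflt) :
    d.modify c dflt f = d := by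
  have hcont : d.contains c = true := by
    rw [PySem.Dict.contains_eq_decide_mem_keys]; simpa using hc
  apply (dict_eq_of_keys_getD _ _ dflt ?_ ?_ ?_)
  · rw [PySem.Dict.keys_modify, PySem.Dict.keys_insert_of_contains _ _ hcont]
    exact hnd
  · rw [PySem.Dict.keys_modify, PySem.Dict.keys_insert_of_contains _ _ hcont]
  · intro k
    rw [PySem.Dict.getD_modify]
    split_ifs with hkc
    · subst hkc; exact hf
    · rfl

theorem getD_setdefault_of_ne {ν : Type} (d : PySem.Dict Int ν) (k k' : Int) (v d0 : ν)
    (hne : k' ≠ k) : (d.setdefault k v).getD k' d0 = d.getD k' d0 := by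
  rw [PySem.Dict.getD_eq_get?_getD, PySem.Dict.get?_setdefault_of_ne _ _ hne,
    ← PySem.Dict.getD_eq_get?_getD]

theorem keys_setdefault_super {ν : Type} (g : PySem.Dict Int ν) (v : ν) (n k : Int)
    (h : k ∈ g.keys) : k ∈ (g.setdefault n v).keys := by
  by_cases hc : g.contains n = true
  · rw [PySem.Dict.setdefault_of_contains _ _ hc]; exact h
  · rw [PySem.Dict.setdefault_of_not_contains _ _ (by simpa using hc)]
    rw [PySem.Dict.mem_keys_insert]; exact Or.inr h

theorem mem_keys_setdefault_self {ν : Type} (g : PySem.Dict Int ν) (v : ν) (n : Int) :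
    n ∈ (g.setdefault n v).keys := by
  by_cases hc : g.contains n = true
  · rw [PySem.Dict.setdefault_of_contains _ _ hc]
    rw [PySem.Dict.contains_eq_decide_mem_keys] at hc; simpa using hc
  · rw [PySem.Dict.setdefault_of_not_contains _ _ (by simpa using hc)]
    rw [PySem.Dict.mem_keys_insert]; exact Or.inl rfl

theorem mem_keys_modify {ν : Type} (d : PySem.Dict Int ν) (c k : Int) (d0 : ν) (f : ν → ν)
    (h : k ∈ d.keys) : k ∈ (d.modify c d0 f).keys := by
  rw [PySem.Dict.keys_modify, PySem.Dict.mem_keys_insert]; exact Or.inr h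

theorem sum_map_update (l : List Int) (f f' : Int → Int) (c δ : Int)
    (hnd : l.Nodup) (hc : c ∈ l) (hne : ∀ j ∈ l, j ≠ c → f' j = f j)
    (hδ : f' c = f c + δ) : (l.map f').sum = (l.map f).sum + δ := by
  induction l with
  | nil => simp at hc
  | cons a t ih =>
    rcases List.mem_cons.mp hc with rfl | hct
    · simp only [List.map_cons, List.sum_cons]
      have : ∀ j ∈ t, f' j = f j := fun j hj =>
        hne j (List.mem_cons_of_mem _ hj) (fun he => (List.nodup_cons.mp hnd).1 (he ▸ hj))
      rw [List.map_congr_left this, hδ]; ring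
    · simp only [List.map_cons, List.sum_cons]
      have ha : f' a = f a := hne a (List.mem_cons_self) (fun he => (List.nodup_cons.mp hnd).1 (he ▸ hct))
      rw [ha, ih (List.nodup_cons.mp hnd).2 hct (fun j hj hne' => hne j (List.mem_cons_of_mem _ hj) hne')]
      ring

theorem setdefault_inv (g : PySem.Dict Int (PySem.Set Int)) (d : PySem.Dict Int Int) (n : Int)
    (h : InvGD g d) : InvGD (g.setdefault n PySem.Set.empty) (d.setdefault n 0) := by
  obtain ⟨hnd, hcl, hk, hgd⟩ := h
  by_cases hc : g.contains n = true
  · have hcd : d.contains n = true := by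
      rw [PySem.Dict.contains_eq_decide_mem_keys] at hc ⊢
      rw [hk]; exact hc
    rw [PySem.Dict.setdefault_of_contains _ _ hc, PySem.Dict.setdefault_of_contains _ _ hcd]
    exact ⟨hnd, hcl, hk, hgd⟩
  · have hcb : g.contains n = false := by simpa using hc
    have hnm : n ∉ g.keys := by
      rw [PySem.Dict.contains_eq_decide_mem_keys] at hcb; simpa using hcb
    have hcd : d.contains n = false := by
      rw [PySem.Dict.contains_eq_decide_mem_keys, hk]; simpa using hnm
    have hkeys : (g.setdefault n PySem.Set.empty).keys = g.keys ++ [n] := by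
      rw [PySem.Dict.keys_setdefault, if_neg (by simp [hcb])]
    have hkeysd : (d.setdefault n (0:Int)).keys = d.keys ++ [n] := by
      rw [PySem.Dict.keys_setdefault, if_neg (by simp [hcd])]
    have hgetn : (g.setdefault n PySem.Set.empty).getD n PySem.Set.empty = PySem.Set.empty := by
      rw [PySem.Dict.getD_setdefault_self, PySem.Dict.getD_of_not_contains _ _ hcb]
    have hgo : ∀ k : Int, k ≠ n →
        (g.setdefault n PySem.Set.empty).getD k PySem.Set.empty = g.getD k PySem.Set.empty :=
      fun k hkn => getD_setdefault_of_ne _ _ _ _ _ hkn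
    have hcnt : ∀ x, cnt (g.setdefault n PySem.Set.empty) x = cnt g x := by
      intro x
      unfold cnt
      rw [hkeys, List.map_append, List.sum_append]
      have h1 : (g.keys.map fun j =>
          (((g.setdefault n PySem.Set.empty).getD j PySem.Set.empty).count x : Int)) =
          g.keys.map fun j => ((g.getD j PySem.Set.empty).count x : Int) := by
        apply List.map_congr_left
        intro j hj
        rw [hgo j (fun he => hnm (he ▸ hj))]
      rw [h1]
      have hn0' : List.count x ((g.setdefault n ([]:List Int)).getD n ([]:List Int)) = 0 := by
        rw [show (g.setdefault n ([]:List Int)).getD n ([]:List Int) = ([]:List Int) from hgetn]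
        rfl
      simp [hn0']
    refine ⟨?_, ?_, ?_, ?_⟩
    · rw [hkeys]
      simp only [List.nodup_append, List.nodup_cons, List.not_mem_nil, not_false_iff, true_and, List.nodup_nil]
      simp [hnd]
      exact fun a ha he => hnm (he ▸ ha)
    · intro k hkmem x hx
      rw [hkeys] at hkmem ⊢
      rcases List.mem_append.mp hkmem with hk1 | hk2
      · rw [hgo k (fun he => hnm (he ▸ hk1))] at hx
        exact List.mem_append.mpr (Or.inl (hcl k hk1 x hx))
      · have : k = n := by simpa using hk2
        subst this
        rw [hgetn] at hx
        simp [PySem.Set.empty] at hx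
    · rw [hkeys, hkeysd, hk]
    · intro x
      rw [hcnt x]
      by_cases hxn : x = n
      · subst hxn
        rw [PySem.Dict.getD_setdefault_self, PySem.Dict.getD_of_not_contains _ _ hcd, ← hgd x]
        rw [PySem.Dict.getD_of_not_contains _ _ hcd]
      · rw [getD_setdefault_of_ne _ _ _ _ _ hxn]
        exact hgd x

theorem edge_inv (g : PySem.Dict Int (PySem.Set Int)) (d : PySem.Dict Int Int) (c n : Int)
    (h : InvGD g d) (hc : c ∈ g.keys) :
    (edgeB (g, d) c n).1 = edgeA g c n ∧ InvGD (edgeA g c n) (edgeB (g, d) c n).2 := by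
  set g1 := g.setdefault n PySem.Set.empty with hg1
  set d1 := d.setdefault n (0:Int) with hd1
  have h1 : InvGD g1 d1 := setdefault_inv g d n h
  obtain ⟨hnd1, hcl1, hk1, hgd1⟩ := h1
  have hc1 : c ∈ g1.keys := keys_setdefault_super g _ n c hc
  have hn1 : n ∈ g1.keys := mem_keys_setdefault_self g _ n
  have hcont1 : g1.contains c = true := by
    rw [PySem.Dict.contains_eq_decide_mem_keys]; simpa using hc1
  set v := g1.getD c PySem.Set.empty with hv
  by_cases hmem : n ∈ v
  · have hcv : PySem.Set.contains v n = true := by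
      simp [PySem.Set.contains_eq_listContains]; exact hmem
    have heA : edgeA g c n = g1 := by
      unfold edgeA
      rw [← hg1]
      exact modify_noop g1 c PySem.Set.empty _ hc1 hnd1 (PySem.Set.add_of_mem hmem)
    have heB : edgeB (g, d) c n = (g1, d1) := by
      unfold edgeB
      simp only [← hg1, ← hd1, ← hv, hcv, if_true]
    rw [heA, heB]
    exact ⟨rfl, hnd1, hcl1, hk1, hgd1⟩
  · have hcv : PySem.Set.contains v n = false := by
      simp [PySem.Set.contains_eq_listContains]; exact hmem
    set g2 := g1.modify c PySem.Set.empty (fun s => PySem.Set.add s n) with hg2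
    set d2 := d1.modify n 0 (· + 1) with hd2
    have heA : edgeA g c n = g2 := rfl
    have heB : edgeB (g, d) c n = (g2, d2) := by
      unfold edgeB
      simp only [← hg1, ← hd1, ← hv, hcv]
      rfl
    have hkg2 : g2.keys = g1.keys := by
      rw [hg2, PySem.Dict.keys_modify, PySem.Dict.keys_insert_of_contains _ _ hcont1]
    have hcontd1 : d1.contains n = true := by
      rw [PySem.Dict.contains_eq_decide_mem_keys, hk1]; simpa using hn1
    have hkd2 : d2.keys = d1.keys := by
      rw [hd2, PySem.Dict.keys_modify, PySem.Dict.keys_insert_of_contains _ _ hcontd1]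
    have hg2get : ∀ k : Int, g2.getD k PySem.Set.empty =
        if k = c then PySem.Set.add v n else g1.getD k PySem.Set.empty := by
      intro k; rw [hg2, PySem.Dict.getD_modify]
    have hcnt2 : ∀ x, cnt g2 x = cnt g1 x + (if x = n then 1 else 0) := by
      intro x
      unfold cnt
      rw [hkg2]
      apply sum_map_update _ _ _ c _ hnd1 hc1
      · intro j _ hj
        rw [hg2get j, if_neg hj]
      · rw [hg2get c, if_pos rfl, PySem.Set.add_of_not_mem hmem, List.count_append]
        by_cases hxn : x = n
        · subst hxn
          push_cast
          simp
          rfl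
        · rw [List.count_eq_zero.mpr (by simp [hxn] : x ∉ [n])]
          push_cast
          simp [hxn]
          rfl
    rw [heA, heB]
    refine ⟨rfl, ?_, ?_, ?_, ?_⟩
    · rw [hkg2]; exact hnd1
    · intro k hkmem x hx
      rw [hkg2] at hkmem ⊢
      rw [hg2get k] at hx
      by_cases hkc : k = c
      · rw [if_pos hkc] at hx
        rw [PySem.Set.add_of_not_mem hmem] at hx
        rcases List.mem_append.mp hx with hx' | hx'
        · exact hcl1 c hc1 x hx'
        · have hxn : x = n := by simpa using hx'
          exact hxn ▸ hn1
      · rw [if_neg hkc] at hx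
        exact hcl1 k hkmem x hx
    · rw [hkd2, hkg2, hk1]
    · intro x
      rw [hcnt2 x, ← hgd1 x, hd2, PySem.Dict.getD_modify]
      by_cases hxn : x = n
      · subst hxn; simp
      · simp [hxn]

theorem chain_zip (rest : List Int) : ∀ x : Int, Chain x (List.zip (x :: rest) rest) := by
  induction rest with
  | nil => intro x; simp [Chain]
  | cons y t ih => intro x; exact ⟨rfl, ih y⟩

theorem edges_inv (ps : List (Int × Int)) :
    ∀ (g : PySem.Dict Int (PySem.Set Int)) (d : PySem.Dict Int Int) (c : Int),
    Chain c ps → c ∈ g.keys → InvGD g d →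
    (edgesB (g, d) ps).1 = edgesA g ps ∧ InvGD (edgesA g ps) (edgesB (g, d) ps).2 := by
  induction ps with
  | nil => intro g d c _ _ h; exact ⟨rfl, h⟩
  | cons p t ih =>
    intro g d c hch hc h
    obtain ⟨hp1, hcht⟩ := hch
    subst hp1
    obtain ⟨he1, he2⟩ := edge_inv g d p.1 p.2 h hc
    have hmemn : p.2 ∈ (edgeA g p.1 p.2).keys := by
      unfold edgeA
      exact mem_keys_modify _ _ _ _ _ (mem_keys_setdefault_self g _ p.2)
    have hstep : edgesB (g, d) (p :: t) = edgesB (edgeB (g, d) p.1 p.2) t := rfl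
    have hstepA : edgesA g (p :: t) = edgesA (edgeA g p.1 p.2) t := rfl
    rw [hstep, hstepA]
    have hEB : edgeB (g, d) p.1 p.2 = (edgeA g p.1 p.2, (edgeB (g, d) p.1 p.2).2) := by
      rw [← he1]
    rw [hEB]
    exact ih (edgeA g p.1 p.2) _ p.2 hcht hmemn he2

theorem drop_succ_lt (seg : List Int) (k : Nat) (n : Int) (rest : List Int)
    (hr : seg.drop (k+1) = n :: rest) : k + 1 < seg.length := by
  have := List.length_drop (l := seg) (i := k+1)
  rw [hr] at this
  simp at this
  omega

theorem auxA (seg : List Int) (rest : List Int) :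
    ∀ (k : Nat) (g : PySem.Dict Int (PySem.Set Int)), seg.drop (k+1) = rest → k < seg.length →
    (PySem.List.enumerate rest ((k:Int)+1)).foldl (fun graph p =>
      let i := p.1
      let num := p.2
      let graph := graph.setdefault num PySem.Set.empty
      if 1 ≤ i ∧ i < (seg.length : Int) then
        graph.modify (PySem.List.pyGetD seg (i - 1) 0) PySem.Set.empty
          (fun s => PySem.Set.add s num)
      else graph) g = edgesA g (List.zip (seg.drop k) rest) := by
  induction rest with
  | nil =>
    intro k g _ _
    simp [PySem.List.enumerate_nil, edgesA]
  | cons n rest' ih =>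
    intro k g hr hk
    have hk1 : k + 1 < seg.length := drop_succ_lt seg k n rest' hr
    have hdk : seg.drop k = seg[k] :: seg.drop (k+1) := (List.getElem_cons_drop (by omega)).symm
    have hdk1 : seg.drop (k+2) = rest' := by
      have : seg.drop (k+2) = (seg.drop (k+1)).drop 1 := by
        rw [List.drop_drop]
      rw [this, hr]; rfl
    rw [PySem.List.enumerate_cons, List.foldl_cons]
    have hcond : (1 ≤ ((k:Int)+1) ∧ ((k:Int)+1) < (seg.length : Int)) := by
      constructor <;> [omega; exact_mod_cast hk1]
    have hidx : PySem.List.pyGetD seg (((k:Int)+1) - 1) 0 = seg[k] := by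
      have : ((k:Int)+1) - 1 = ((k : Nat) : Int) := by omega
      rw [this, PySem.List.pyGetD_natCast, List.getD_eq_getElem?_getD, List.getElem?_eq_getElem (by omega)]
      rfl
    have hbody : (let i := (((k:Int)+1, n) : Int × Int).1
        let num := (((k:Int)+1, n) : Int × Int).2
        let graph := g.setdefault num PySem.Set.empty
        if 1 ≤ i ∧ i < (seg.length : Int) then
          graph.modify (PySem.List.pyGetD seg (i - 1) 0) PySem.Set.empty
            (fun s => PySem.Set.add s num)
        else graph) = edgeA g seg[k] n := by
      show (if (1:Int) ≤ ((k:Int)+1) ∧ ((k:Int)+1) < (seg.length : Int) then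
          (g.setdefault n PySem.Set.empty).modify (PySem.List.pyGetD seg (((k:Int)+1) - 1) 0)
            PySem.Set.empty (fun s => PySem.Set.add s n)
        else g.setdefault n PySem.Set.empty) = edgeA g seg[k] n
      rw [if_pos hcond, hidx]
      rfl
    rw [hbody]
    have : ((k:Int) + 1 + 1) = (((k+1 : Nat) : Int) + 1) := by push_cast; ring
    rw [this, ih (k+1) (edgeA g seg[k] n) hdk1 (by omega)]
    rw [hdk, hr, List.zip_cons_cons]
    rfl

theorem segA_eq (seg : List Int) (g : PySem.Dict Int (PySem.Set Int)) :
    segA seg g = match seg with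
      | [] => g
      | x :: rest => edgesA (g.setdefault x PySem.Set.empty) (List.zip (x :: rest) rest) := by
  cases seg with
  | nil => rfl
  | cons x rest =>
    unfold segA
    rw [if_neg (by simp only [List.length_cons]; push_cast; omega)]
    rw [PySem.List.enumerate_cons, List.foldl_cons]
    have hbody0 : (let i := (((0:Int), x) : Int × Int).1
        let num := (((0:Int), x) : Int × Int).2
        let graph := g.setdefault num PySem.Set.empty
        if 1 ≤ i ∧ i < (((x :: rest).length : Nat) : Int) then
          graph.modify (PySem.List.pyGetD (x :: rest) (i - 1) 0) PySem.Set.empty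
            (fun s => PySem.Set.add s num)
        else graph) = g.setdefault x PySem.Set.empty := by
      show (if (1:Int) ≤ 0 ∧ (0:Int) < (((x :: rest).length : Nat) : Int) then
          (g.setdefault x PySem.Set.empty).modify (PySem.List.pyGetD (x :: rest) ((0:Int) - 1) 0)
            PySem.Set.empty (fun s => PySem.Set.add s x)
        else g.setdefault x PySem.Set.empty) = g.setdefault x PySem.Set.empty
      rw [if_neg (by norm_num)]
    rw [hbody0]
    have := auxA (x :: rest) rest 0 (g.setdefault x PySem.Set.empty) rfl (by simp)
    rw [List.drop_zero] at this
    norm_num at this ⊢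
    exact this

theorem auxB (seg : List Int) (rest : List Int) :
    ∀ (k : Nat) (st : PySem.Dict Int (PySem.Set Int) × PySem.Dict Int Int),
    seg.drop (k+1) = rest → k < seg.length →
    (PySem.List.enumerate rest ((k:Int)+1)).foldl (fun st p =>
      let i := p.1
      let num := p.2
      let graph := st.1.setdefault num PySem.Set.empty
      let in_degree := st.2.setdefault num (0 : Int)
      if 1 ≤ i then
        let prev := PySem.List.pyGetD seg (i - 1) 0
        if PySem.Set.contains (graph.getD prev PySem.Set.empty) num then (graph, in_degree)
        else (graph.modify prev PySem.Set.empty (fun s => PySem.Set.add s num),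
              in_degree.modify num 0 (· + 1))
      else (graph, in_degree)) st = edgesB st (List.zip (seg.drop k) rest) := by
  induction rest with
  | nil =>
    intro k st _ _
    simp [PySem.List.enumerate_nil, edgesB]
  | cons n rest' ih =>
    intro k st hr hk
    have hk1 : k + 1 < seg.length := drop_succ_lt seg k n rest' hr
    have hdk : seg.drop k = seg[k] :: seg.drop (k+1) := (List.getElem_cons_drop (by omega)).symm
    have hdk1 : seg.drop (k+2) = rest' := by
      have : seg.drop (k+2) = (seg.drop (k+1)).drop 1 := by rw [List.drop_drop]
      rw [this, hr]; rfl
    rw [PySem.List.enumerate_cons, List.foldl_cons]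
    have hidx : PySem.List.pyGetD seg (((k:Int)+1) - 1) 0 = seg[k] := by
      have : ((k:Int)+1) - 1 = ((k : Nat) : Int) := by omega
      rw [this, PySem.List.pyGetD_natCast, List.getD_eq_getElem?_getD, List.getElem?_eq_getElem (by omega)]
      rfl
    have hbody : (let i := (((k:Int)+1, n) : Int × Int).1
        let num := (((k:Int)+1, n) : Int × Int).2
        let graph := st.1.setdefault num PySem.Set.empty
        let in_degree := st.2.setdefault num (0 : Int)
        if 1 ≤ i then
          let prev := PySem.List.pyGetD seg (i - 1) 0
          if PySem.Set.contains (graph.getD prev PySem.Set.empty) num then (graph, in_degree)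
          else (graph.modify prev PySem.Set.empty (fun s => PySem.Set.add s num),
                in_degree.modify num 0 (· + 1))
        else (graph, in_degree)) = edgeB st seg[k] n := by
      show (if (1:Int) ≤ ((k:Int)+1) then
          (if PySem.Set.contains ((st.1.setdefault n PySem.Set.empty).getD
                (PySem.List.pyGetD seg (((k:Int)+1) - 1) 0) PySem.Set.empty) n then
            (st.1.setdefault n PySem.Set.empty, st.2.setdefault n (0:Int))
          else ((st.1.setdefault n PySem.Set.empty).modify (PySem.List.pyGetD seg (((k:Int)+1) - 1) 0)
                  PySem.Set.empty (fun s => PySem.Set.add s n),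
                (st.2.setdefault n (0:Int)).modify n 0 (· + 1)))
        else (st.1.setdefault n PySem.Set.empty, st.2.setdefault n (0:Int))) = edgeB st seg[k] n
      rw [if_pos (by omega : (1:Int) ≤ (k:Int)+1), hidx]
      rfl
    rw [hbody]
    have : ((k:Int) + 1 + 1) = (((k+1 : Nat) : Int) + 1) := by push_cast; ring
    rw [this, ih (k+1) (edgeB st seg[k] n) hdk1 (by omega)]
    rw [hdk, hr, List.zip_cons_cons]
    rfl

theorem segB_eq (seg : List Int) (st : PySem.Dict Int (PySem.Set Int) × PySem.Dict Int Int) :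
    segB seg st = match seg with
      | [] => st
      | x :: rest => edgesB (st.1.setdefault x PySem.Set.empty, st.2.setdefault x 0) (List.zip (x :: rest) rest) := by
  cases seg with
  | nil => rfl
  | cons x rest =>
    unfold segB
    rw [PySem.List.enumerate_cons, List.foldl_cons]
    have hbody0 : (let i := (((0:Int), x) : Int × Int).1
        let num := (((0:Int), x) : Int × Int).2
        let graph := st.1.setdefault num PySem.Set.empty
        let in_degree := st.2.setdefault num (0 : Int)
        if 1 ≤ i then
          let prev := PySem.List.pyGetD (x :: rest) (i - 1) 0
          if PySem.Set.contains (graph.getD prev PySem.Set.empty) num then (graph, in_degree)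
          else (graph.modify prev PySem.Set.empty (fun s => PySem.Set.add s num),
                in_degree.modify num 0 (· + 1))
        else (graph, in_degree)) = (st.1.setdefault x PySem.Set.empty, st.2.setdefault x 0) := by
      show (if (1:Int) ≤ 0 then
          (if PySem.Set.contains ((st.1.setdefault x PySem.Set.empty).getD
                (PySem.List.pyGetD (x :: rest) ((0:Int) - 1) 0) PySem.Set.empty) x then
            (st.1.setdefault x PySem.Set.empty, st.2.setdefault x (0:Int))
          else ((st.1.setdefault x PySem.Set.empty).modify (PySem.List.pyGetD (x :: rest) ((0:Int) - 1) 0)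
                  PySem.Set.empty (fun s => PySem.Set.add s x),
                (st.2.setdefault x (0:Int)).modify x 0 (· + 1)))
        else (st.1.setdefault x PySem.Set.empty, st.2.setdefault x (0:Int))) =
        (st.1.setdefault x PySem.Set.empty, st.2.setdefault x 0)
      rw [if_neg (by norm_num)]
    rw [hbody0]
    have := auxB (x :: rest) rest 0 (st.1.setdefault x PySem.Set.empty, st.2.setdefault x 0) rfl (by simp)
    rw [List.drop_zero] at this
    norm_num at this ⊢
    exact this

theorem seg_inv (seg : List Int) (g : PySem.Dict Int (PySem.Set Int)) (d : PySem.Dict Int Int)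
    (h : InvGD g d) :
    (segB seg (g, d)).1 = segA seg g ∧ InvGD (segA seg g) (segB seg (g, d)).2 := by
  cases seg with
  | nil => rw [segA_eq, segB_eq]; exact ⟨rfl, h⟩
  | cons x rest =>
    rw [segA_eq, segB_eq]
    exact edges_inv (List.zip (x :: rest) rest) (g.setdefault x PySem.Set.empty)
      (d.setdefault x 0) x (chain_zip rest x) (mem_keys_setdefault_self g _ x)
      (setdefault_inv g d x h)

theorem outer_inv (seqs : List (List Int)) :
    ∀ (g : PySem.Dict Int (PySem.Set Int)) (d : PySem.Dict Int Int), InvGD g d →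
    (seqs.foldl (fun st seg => segB seg st) (g, d)).1 = seqs.foldl (fun g seg => segA seg g) g ∧
    InvGD (seqs.foldl (fun g seg => segA seg g) g) (seqs.foldl (fun st seg => segB seg st) (g, d)).2 := by
  induction seqs with
  | nil => intro g d h; exact ⟨rfl, h⟩
  | cons seg t ih =>
    intro g d h
    obtain ⟨h1, h2⟩ := seg_inv seg g d h
    simp only [List.foldl_cons]
    have : segB seg (g, d) = (segA seg g, (segB seg (g, d)).2) := by rw [← h1]
    rw [this]
    exact ih (segA seg g) _ h2

theorem set_update_append (s : PySem.Set Int) (xs : List Int) :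
    ∀ (_ : xs.Nodup) (_ : ∀ x ∈ xs, x ∉ s), PySem.Set.update s xs = s ++ xs := by
  induction xs generalizing s with
  | nil => intro _ _; simp [PySem.Set.update]
  | cons x t ih =>
    intro h1 h2
    have : PySem.Set.update s (x :: t) = PySem.Set.update (PySem.Set.add s x) t := rfl
    rw [this, PySem.Set.add_of_not_mem (h2 x List.mem_cons_self)]
    rw [ih (s ++ [x]) (List.nodup_cons.mp h1).2 ?_]
    · simp
    · intro y hy
      simp only [List.mem_append, List.mem_singleton]
      rintro (hys | rfl)
      · exact h2 y (List.mem_cons_of_mem _ hy) hys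
      · exact (List.nodup_cons.mp h1).1 hy

theorem set_update_of_subset (s : PySem.Set Int) (xs : List Int)
    (h : ∀ x ∈ xs, x ∈ s) : PySem.Set.update s xs = s := by
  induction xs generalizing s with
  | nil => rfl
  | cons x t ih =>
    have : PySem.Set.update s (x :: t) = PySem.Set.update (PySem.Set.add s x) t := rfl
    rw [this, PySem.Set.add_of_mem (h x List.mem_cons_self)]
    exact ih s (fun y hy => h y (List.mem_cons_of_mem _ hy))

theorem zeros_getD (l : List Int) :
    ∀ (d : PySem.Dict Int Int), (∀ x : Int, d.getD x 0 = 0) →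
    ∀ x : Int, (l.foldl (fun d node => d.insert node 0) d).getD x 0 = 0 := by
  induction l with
  | nil => intro d h x; exact h x
  | cons a t ih =>
    intro d h x
    rw [List.foldl_cons]
    apply ih
    intro y
    rw [PySem.Dict.getD_insert]
    split_ifs with hy
    · rfl
    · exact h y

theorem zeros_keys (l : List Int) (hnd : l.Nodup) :
    (l.foldl (fun d node => d.insert node (0:Int)) PySem.Dict.empty).keys = l := by
  have := PySem.Dict.keys_foldl_insert (l := l) (f := fun _ _ => (0:Int)) (d := PySem.Dict.empty)
  rw [this, PySem.Dict.keys_empty]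
  have h2 := set_update_append ([] : PySem.Set Int) l hnd (by simp)
  rw [h2]; simp

theorem phase2_getD (G : PySem.Dict Int (PySem.Set Int)) (l : List Int) :
    ∀ (d : PySem.Dict Int Int) (x : Int),
    (l.foldl (fun d node =>
      (G.getD node PySem.Set.empty).foldl (fun d s => d.modify s 0 (· + 1)) d) d).getD x 0 =
    d.getD x 0 + (l.map (fun j => ((G.getD j PySem.Set.empty).count x : Int))).sum := by
  induction l with
  | nil => intro d x; simp
  | cons a t ih =>
    intro d x
    rw [List.foldl_cons, ih, PySem.Dict.getD_foldl_modify_add_one]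
    simp
    ring

theorem phase2_keys (G : PySem.Dict Int (PySem.Set Int))
    (hcl : ∀ k ∈ G.keys, ∀ x ∈ G.getD k PySem.Set.empty, x ∈ G.keys) (l : List Int)
    (hl : ∀ j ∈ l, j ∈ G.keys) :
    ∀ (d : PySem.Dict Int Int), d.keys = G.keys →
    (l.foldl (fun d node =>
      (G.getD node PySem.Set.empty).foldl (fun d s => d.modify s 0 (· + 1)) d) d).keys = G.keys := by
  induction l with
  | nil => intro d h; exact h
  | cons a t ih =>
    intro d h
    rw [List.foldl_cons]
    apply ih (fun j hj => hl j (List.mem_cons_of_mem _ hj))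
    have := PySem.Dict.keys_foldl_modify (l := G.getD a PySem.Set.empty) (d0 := (0:Int))
      (f := fun _ _ v => v + 1) (d := d)
    rw [this, h]
    exact set_update_of_subset _ _ (fun x hx => hcl a (hl a List.mem_cons_self) x hx)

theorem phase2_spec (G : PySem.Dict Int (PySem.Set Int))
    (hnd : G.keys.Nodup) (hcl : ∀ k ∈ G.keys, ∀ x ∈ G.getD k PySem.Set.empty, x ∈ G.keys) :
    (G.keys.foldl (fun d node =>
      (G.getD node PySem.Set.empty).foldl (fun d s => d.modify s 0 (· + 1)) d)
      (G.keys.foldl (fun d node => d.insert node (0:Int)) PySem.Dict.empty)).keys = G.keys ∧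
    ∀ x, (G.keys.foldl (fun d node =>
      (G.getD node PySem.Set.empty).foldl (fun d s => d.modify s 0 (· + 1)) d)
      (G.keys.foldl (fun d node => d.insert node (0:Int)) PySem.Dict.empty)).getD x 0 = cnt G x := by
  constructor
  · exact phase2_keys G hcl G.keys (fun j hj => hj) _ (zeros_keys G.keys hnd)
  · intro x
    rw [phase2_getD, zeros_getD G.keys PySem.Dict.empty (fun y => PySem.Dict.getD_empty y 0) x]
    unfold cnt
    ring

theorem inv_empty : InvGD PySem.Dict.empty PySem.Dict.empty := by
  refine ⟨?_, ?_, ?_, ?_⟩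
  · rw [PySem.Dict.keys_empty]; exact List.nodup_nil
  · intro k hk; rw [PySem.Dict.keys_empty] at hk; simp at hk
  · rfl
  · intro x
    rw [PySem.Dict.getD_empty]
    unfold cnt
    rw [PySem.Dict.keys_empty]
    rfl

-- ===== VERDICT (by name: the statement is the Claim_ definition above) =====
theorem build605_spec : Claim_equal_build605 := by
  intro org seqs _
  unfold Spec_build605
  have hA : build605 org seqs =
      (let G := seqs.foldl (fun g seg => segA seg g) PySem.Dict.empty
       (G.items, (G.keys.foldl (fun d node =>
          (G.getD node PySem.Set.empty).foldl (fun d s => d.modify s 0 (· + 1)) d)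
          (G.keys.foldl (fun d node => d.insert node (0:Int)) PySem.Dict.empty)).items)) := rfl
  have hB : build605_alt org seqs =
      (let st := seqs.foldl (fun st seg => segB seg st)
        ((PySem.Dict.empty : PySem.Dict Int (PySem.Set Int)), (PySem.Dict.empty : PySem.Dict Int Int))
       (st.1.items, st.2.items)) := rfl
  rw [hA, hB]
  obtain ⟨h1, h2⟩ := outer_inv seqs PySem.Dict.empty PySem.Dict.empty inv_empty
  set G := seqs.foldl (fun g seg => segA seg g) PySem.Dict.empty with hG
  set st := seqs.foldl (fun st seg => segB seg st) (PySem.Dict.empty, PySem.Dict.empty) with hst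
  obtain ⟨hnd, hcl, hk, hgd⟩ := h2
  obtain ⟨hpk, hpg⟩ := phase2_spec G hnd hcl
  have hdeq : (G.keys.foldl (fun d node =>
      (G.getD node PySem.Set.empty).foldl (fun d s => d.modify s 0 (· + 1)) d)
      (G.keys.foldl (fun d node => d.insert node (0:Int)) PySem.Dict.empty)) = st.2 := by
    apply dict_eq_of_keys_getD _ _ 0
    · rw [hpk]; exact hnd
    · rw [hpk, hk]
    · intro k
      rw [hpg k, hgd k]
  simp only []
  rw [hdeq, h1]
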